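-- pv_equiv track=rewrite | github.com/DevinChang/ocr | test.py | subfiledata
-- ===== SOURCE A (Python) =====
-- def subfiledata(direction, parameter, boundary, datas):
--     leftdata = []
--     rightdata = []
--     for data in datas:
--         if direction == 1 or direction == 2:
--             if data['location'][parameter] >= boundary:
--                 #此处有bug
--                 leftdata.append(data)
--             else:
--                 rightdata.append(data)
--         else:
--             if data['location'][parameter] <= boundary:
--                 leftdata.append(data)
--             else:
--                 rightdata.append(data)
--     return leftdata + rightdata
-- ===== SOURCE B (Python) =====
-- def subfiledata(direction, parameter, boundary, datas):
--     if direction == 1 or direction == 2: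
--         keyfn = lambda d: 0 if d['location'][parameter] >= boundary else 1
--     else:
--         keyfn = lambda d: 0 if d['location'][parameter] <= boundary else 1
--     return sorted(datas, key=keyfn)
-- ===== Notes on version B (the rewrite author's own statement) =====
-- stated objective: idiomatic
-- what changed: Replaces the explicit two-accumulator partition loop and concatenation with a single stable sort by a 0/1 predicate key (stability keeps each group's original order, so the result is exactly leftdata + rightdata).
import Mathlib
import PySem

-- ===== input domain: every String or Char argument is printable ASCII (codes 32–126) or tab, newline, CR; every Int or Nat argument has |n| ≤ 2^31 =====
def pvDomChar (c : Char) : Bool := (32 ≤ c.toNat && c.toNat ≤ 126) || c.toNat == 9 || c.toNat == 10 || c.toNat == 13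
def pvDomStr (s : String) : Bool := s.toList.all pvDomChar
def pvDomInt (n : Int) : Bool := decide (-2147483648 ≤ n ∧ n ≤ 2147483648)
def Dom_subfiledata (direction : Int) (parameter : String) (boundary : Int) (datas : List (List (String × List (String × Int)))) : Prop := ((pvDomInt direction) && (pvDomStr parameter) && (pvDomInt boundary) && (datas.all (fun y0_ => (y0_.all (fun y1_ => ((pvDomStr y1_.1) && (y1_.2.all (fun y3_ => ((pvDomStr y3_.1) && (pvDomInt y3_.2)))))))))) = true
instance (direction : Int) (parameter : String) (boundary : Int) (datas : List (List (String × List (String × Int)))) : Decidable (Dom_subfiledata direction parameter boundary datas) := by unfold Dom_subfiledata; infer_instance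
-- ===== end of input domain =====

-- ===== PORT A =====
-- B replaces A's two-accumulator partition loop with one stable sort by a 0/1 key (idiomatic; return value proved equal on Pre_).
def subfiledata (direction : Int) (parameter : String) (boundary : Int) (datas : List (List (String × List (String × Int)))) : List (List (String × List (String × Int))) :=
  -- leftdata = []; rightdata = []; for data in datas: …  (dict lookups via Dict.getD; Pre_ guarantees the keys exist)
  let r := datas.foldl (fun (acc : List (List (String × List (String × Int))) × List (List (String × List (String × Int)))) data =>
    if direction = 1 ∨ direction = 2 then
      if PySem.Dict.getD ⟨PySem.Dict.getD ⟨data⟩ "location" ([] : List (String × Int))⟩ parameter 0 ≥ boundary then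
        (acc.1 ++ [data], acc.2)
      else
        (acc.1, acc.2 ++ [data])
    else
      if PySem.Dict.getD ⟨PySem.Dict.getD ⟨data⟩ "location" ([] : List (String × Int))⟩ parameter 0 ≤ boundary then
        (acc.1 ++ [data], acc.2)
      else
        (acc.1, acc.2 ++ [data])) ([], [])
  r.1 ++ r.2

-- ===== PORT B =====
def subfiledata_alt (direction : Int) (parameter : String) (boundary : Int) (datas : List (List (String × List (String × Int)))) : List (List (String × List (String × Int))) :=
  -- keyfn = lambda d: 0 if d['location'][parameter] >=/<= boundary else 1; return sorted(datas, key=keyfn)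
  if direction = 1 ∨ direction = 2 then
    PySem.List.sorted datas (fun d => if PySem.Dict.getD ⟨PySem.Dict.getD ⟨d⟩ "location" ([] : List (String × Int))⟩ parameter 0 ≥ boundary then (0 : Int) else 1) false
  else
    PySem.List.sorted datas (fun d => if PySem.Dict.getD ⟨PySem.Dict.getD ⟨d⟩ "location" ([] : List (String × Int))⟩ parameter 0 ≤ boundary then (0 : Int) else 1) false

-- ===== PRECONDITION & SPEC =====
-- Pre_ excludes exactly the inputs where Python raises KeyError: some data lacking a 'location' key,
-- or whose location dict lacking the parameter key (both A and B raise there).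
def Pre_subfiledata (direction : Int) (parameter : String) (boundary : Int) (datas : List (List (String × List (String × Int)))) : Prop :=
  ∀ d ∈ datas, (PySem.Dict.get? ⟨d⟩ "location").isSome = true ∧
    (PySem.Dict.get? (⟨PySem.Dict.getD ⟨d⟩ "location" ([] : List (String × Int))⟩ : PySem.Dict String Int) parameter).isSome = true
instance (direction : Int) (parameter : String) (boundary : Int) (datas : List (List (String × List (String × Int)))) : Decidable (Pre_subfiledata direction parameter boundary datas) := by unfold Pre_subfiledata; infer_instance

def pvWitness_subfiledata : Int × String × Int × (List (List (String × List (String × Int)))) :=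
  (1, "x", 0, [[("location", [("x", 3)])], [("location", [("x", -2)])], [("location", [("x", 0)])]])
def Spec_subfiledata (direction : Int) (parameter : String) (boundary : Int) (datas : List (List (String × List (String × Int)))) (out : List (List (String × List (String × Int)))) : Prop := out = subfiledata_alt direction parameter boundary datas
instance (direction : Int) (parameter : String) (boundary : Int) (datas : List (List (String × List (String × Int)))) (out : List (List (String × List (String × Int)))) : Decidable (Spec_subfiledata direction parameter boundary datas out) := by unfold Spec_subfiledata; infer_instance

-- ===== CLAIM (what is proved, stated in full; the proofs are below) =====
def Claim_equal_subfiledata : Prop := ∀ (direction : Int) (parameter : String) (boundary : Int) (datas : List (List (String × List (String × Int)))), Dom_subfiledata direction parameter boundary datas → Pre_subfiledata direction parameter boundary datas → Spec_subfiledata direction parameter boundary datas (subfiledata direction parameter boundary datas)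

-- ===== LEMMAS AND PROOFS =====
-- insertBy places x between an all-true prefix and an all-false suffix of a binary-keyed list
theorem insertBy_append_mid {α : Type} (before : α → α → Bool) (x : α) (T F : List α)
    (h1 : ∀ t ∈ T, before x t = false) (h2 : ∀ f ∈ F, before x f = true) :
    PySem.List.insertBy before x (T ++ F) = T ++ x :: F := by
  induction T with
  | nil =>
    cases F with
    | nil => simp [PySem.List.insertBy]
    | cons f F' => simp [PySem.List.insertBy, h2 f (by simp)]
  | cons t T' ih =>
    simp only [List.cons_append, PySem.List.insertBy, h1 t (by simp), Bool.false_eq_true,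
      if_false, List.cons.injEq, true_and]
    exact ih (fun t ht => h1 t (by simp [ht]))

-- a stable insertion sort by a 0/1 key is exactly the stable partition
theorem foldl_insertBy_binary {α : Type} (p : α → Prop) [DecidablePred p] (xs : List α) (T F : List α)
    (hT : ∀ a ∈ T, p a) (hF : ∀ a ∈ F, ¬ p a) :
    xs.foldl (fun acc x => PySem.List.insertBy
        (fun a b => decide ((if p a then (0 : Int) else 1) < (if p b then (0 : Int) else 1))) x acc) (T ++ F)
      = (T ++ xs.filter (fun x => decide (p x))) ++ (F ++ xs.filter (fun x => !decide (p x))) := by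
  induction xs generalizing T F with
  | nil => simp
  | cons x xs ih =>
    by_cases hx : p x
    · have hT' : ∀ a ∈ T ++ [x], p a := by
        intro a ha
        rcases List.mem_append.mp ha with h | h
        · exact hT a h
        · simp only [List.mem_singleton] at h
          subst h; exact hx
      rw [List.foldl_cons,
        insertBy_append_mid _ _ T F (fun t ht => by simp [hx, hT t ht]) (fun f hf => by simp [hx, hF f hf]),
        show T ++ x :: F = (T ++ [x]) ++ F by simp,
        ih (T ++ [x]) F hT' hF]
      simp [hx]
    · have hF' : ∀ a ∈ F ++ [x], ¬ p a := by
        intro a ha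
        rcases List.mem_append.mp ha with h | h
        · exact hF a h
        · simp only [List.mem_singleton] at h
          subst h; exact hx
      rw [List.foldl_cons,
        PySem.List.insertBy_of_forall_not_before _ x (T ++ F)
          (fun y _ => by by_cases hy : p y <;> simp [hx, hy]),
        List.append_assoc,
        ih T (F ++ [x]) hT hF']
      simp [hx]

-- A's two-accumulator loop is the stable partition
theorem foldl_partition {α : Type} (p : α → Prop) [DecidablePred p] (xs : List α) (L R : List α) :
    xs.foldl (fun (acc : List α × List α) x =>
        if p x then (acc.1 ++ [x], acc.2) else (acc.1, acc.2 ++ [x])) (L, R)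
      = (L ++ xs.filter (fun x => decide (p x)), R ++ xs.filter (fun x => !decide (p x))) := by
  induction xs generalizing L R with
  | nil => simp
  | cons x xs ih => by_cases hx : p x <;> simp [hx, ih]

theorem partition_eq_sorted {α : Type} (p : α → Prop) [DecidablePred p] (xs : List α) :
    (let r := xs.foldl (fun (acc : List α × List α) x =>
        if p x then (acc.1 ++ [x], acc.2) else (acc.1, acc.2 ++ [x])) ([], [])
     r.1 ++ r.2)
      = PySem.List.sorted xs (fun x => if p x then (0 : Int) else 1) false := by
  dsimp only
  rw [PySem.List.sorted_eq_foldl_insertBy, foldl_partition p xs [] []]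
  have h := foldl_insertBy_binary p xs [] [] (by simp) (by simp)
  simpa using h.symm

-- ===== VERDICT (by name: the statement is the Claim_ definition above) =====
theorem subfiledata_spec : Claim_equal_subfiledata := by
  intro direction parameter boundary datas _ _
  unfold Spec_subfiledata subfiledata subfiledata_alt
  by_cases hd : direction = 1 ∨ direction = 2
  · simp only [if_pos hd]
    exact partition_eq_sorted (fun d => PySem.Dict.getD ⟨PySem.Dict.getD ⟨d⟩ "location" ([] : List (String × Int))⟩ parameter 0 ≥ boundary) datas
  · simp only [if_neg hd]
    exact partition_eq_sorted (fun d => PySem.Dict.getD ⟨PySem.Dict.getD ⟨d⟩ "location" ([] : List (String × Int))⟩ parameter 0 ≤ boundary) datas
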